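-- pv_equiv track=rewrite | github.com/alexykn/sps2 | refactor/generate_events_inventory.py | collect_leading_doc
-- ===== SOURCE A (Python) =====
-- from typing import Iterator, List
--
-- def collect_leading_doc(lines: List[str], start_index: int) -> List[str]:
--     docs: List[str] = []
--     i = start_index - 1
--     while i >= 0:
--         stripped = lines[i].strip()
--         if stripped.startswith("///"):
--             docs.append(stripped[3:].strip())
--         elif stripped == "":
--             i -= 1
--             continue
--         else:
--             break
--         i -= 1
--     docs.reverse()
--     return docs
-- ===== SOURCE B (Python) =====
-- def collect_leading_doc(lines, start_index):
--     # Backward scan only to find the boundary: first real-code line above start_index.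
--     b = start_index - 1
--     while b >= 0:
--         s = lines[b].strip()
--         if s and not s.startswith("///"):
--             break
--         b -= 1
--     # Forward pass: keep the doc lines in that window, already in order (no reverse).
--     return [s[3:].strip()
--             for s in (ln.strip() for ln in lines[max(b + 1, 0):max(start_index, 0)])
--             if s.startswith("///")]
-- ===== Notes on version B (the rewrite author's own statement) =====
-- stated objective: simpler
-- what changed: B first scans backward only to find the boundary index of the last real-code line, then collects the doc lines in one forward filter pass over the slice, removing A's accumulate-then-reverse.
import Mathlib
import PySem

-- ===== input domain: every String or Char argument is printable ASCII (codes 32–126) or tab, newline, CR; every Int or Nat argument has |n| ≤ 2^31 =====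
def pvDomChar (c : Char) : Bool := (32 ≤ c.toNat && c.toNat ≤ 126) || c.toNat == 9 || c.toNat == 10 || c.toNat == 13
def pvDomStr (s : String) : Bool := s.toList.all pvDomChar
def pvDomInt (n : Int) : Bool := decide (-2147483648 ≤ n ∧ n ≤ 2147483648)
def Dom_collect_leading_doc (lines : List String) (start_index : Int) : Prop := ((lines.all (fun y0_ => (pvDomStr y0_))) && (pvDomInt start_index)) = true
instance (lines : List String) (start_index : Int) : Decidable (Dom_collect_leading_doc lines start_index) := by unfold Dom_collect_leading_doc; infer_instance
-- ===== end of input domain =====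

set_option maxHeartbeats 1000000

-- B separates boundary-finding (backward scan) from collection (forward filter pass),
-- eliminating A's accumulator-and-reverse; objective: simpler, no speed claim.


-- ===== PORT A =====
-- A's while loop, i going n-1, n-2, …; fuel n = i+1. lines[i] is ported as
-- lines.getD n "" — in range under Pre_ (Python raises IndexError outside it).
def pvALoop (lines : List String) : Nat → List String → List String
  | 0, docs => docs.reverse
  | n+1, docs =>
    let stripped := PySem.Str.strip (lines.getD n "")
    if PySem.Str.startswith stripped "///" then
      pvALoop lines n (docs ++ [PySem.Str.strip (PySem.Str.slice stripped (some 3) none)])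
    else if stripped = "" then
      pvALoop lines n docs
    else docs.reverse

def collect_leading_doc (lines : List String) (start_index : Int) : List String :=
  pvALoop lines start_index.toNat []

-- ===== PORT B =====
-- Source B's boundary loop: b starts at start_index-1, decremented while blank or doc;
-- fuel start_index.toNat counts the iterations (b ≥ 0).
def pvBFind (lines : List String) : Int → Nat → Int
  | b, 0 => b
  | b, n+1 =>
    let s := PySem.Str.strip (lines.getD b.toNat "")
    if s ≠ "" ∧ ¬ (PySem.Str.startswith s "///" = true) then b
    else pvBFind lines (b - 1) n

-- Source B's list comprehension over a given window
def pvComp (l : List String) : List String :=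
  ((l.map PySem.Str.strip).filter (fun s => PySem.Str.startswith s "///")).map
    (fun s => PySem.Str.strip (PySem.Str.slice s (some 3) none))

def collect_leading_doc_alt (lines : List String) (start_index : Int) : List String :=
  let b := pvBFind lines (start_index - 1) start_index.toNat
  pvComp (PySem.List.slice lines (some (max (b + 1) 0)) (some (max start_index 0)))

-- ===== PRECONDITION & SPEC =====
-- Pre_ excludes start_index > len(lines), where A's lines[start_index-1] raises IndexError.
def Pre_collect_leading_doc (lines : List String) (start_index : Int) : Prop :=
  start_index ≤ (lines.length : Int)
instance (lines : List String) (start_index : Int) : Decidable (Pre_collect_leading_doc lines start_index) := by unfold Pre_collect_leading_doc; infer_instance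

def pvWitness_collect_leading_doc : List String × Int := (["code;", "/// docs", ""], 3)

def Spec_collect_leading_doc (lines : List String) (start_index : Int) (out : List String) : Prop := out = collect_leading_doc_alt lines start_index
instance (lines : List String) (start_index : Int) (out : List String) : Decidable (Spec_collect_leading_doc lines start_index out) := by unfold Spec_collect_leading_doc; infer_instance

-- ===== CLAIM (what is proved, stated in full; the proofs are below) =====
def Claim_equal_collect_leading_doc : Prop := ∀ (lines : List String) (start_index : Int), Dom_collect_leading_doc lines start_index → Pre_collect_leading_doc lines start_index → Spec_collect_leading_doc lines start_index (collect_leading_doc lines start_index)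

-- ===== LEMMAS AND PROOFS =====

-- Forward-order characterisation of the collected docs below index n.
def pvG (lines : List String) : Nat → List String
  | 0 => []
  | n+1 =>
    let s := PySem.Str.strip (lines.getD n "")
    if PySem.Str.startswith s "///" then
      pvG lines n ++ [PySem.Str.strip (PySem.Str.slice s (some 3) none)]
    else if s = "" then pvG lines n
    else []

theorem pvALoop_eq_g (lines : List String) (n : Nat) (docs : List String) :
    pvALoop lines n docs = pvG lines n ++ docs.reverse := by
  induction n generalizing docs with
  | zero => simp [pvALoop, pvG]
  | succ n ih =>
    simp only [pvALoop, pvG]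
    split_ifs with h1 h2
    · rw [ih]; simp
    · rw [ih]
    · simp

theorem pvBFind_bounds (lines : List String) (n : Nat) :
    -1 ≤ pvBFind lines ((n : Int) - 1) n ∧ pvBFind lines ((n : Int) - 1) n < n := by
  induction n with
  | zero => simp [pvBFind]
  | succ n ih =>
    simp only [pvBFind]
    split_ifs with h
    · push_cast; omega
    · have e : ((n : Int) + 1 - 1 - 1) = (n : Int) - 1 := by ring
      push_cast
      rw [e]
      omega

theorem pvComp_append (l l' : List String) : pvComp (l ++ l') = pvComp l ++ pvComp l' := by
  simp [pvComp]

-- B's value at fuel n equals the forward characterisation, for n within the list.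
theorem pvB_eq_g (lines : List String) (n : Nat) (hn : n ≤ lines.length) :
    pvComp (PySem.List.slice lines
      (some (max (pvBFind lines ((n : Int) - 1) n + 1) 0)) (some (max (n : Int) 0))) =
    pvG lines n := by
  induction n with
  | zero =>
    simp only [pvBFind, pvG, Nat.cast_zero]
    have h1 : max ((0 : Int) - 1 + 1) 0 = 0 := by omega
    have h2 : max (0 : Int) 0 = 0 := by omega
    rw [h1, h2, PySem.List.slice_toNat _ le_rfl le_rfl]
    simp [pvComp]
  | succ n ih =>
    have hlt : n < lines.length := by omega
    have hget : lines.getD n "" = lines[n] := by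
      rw [List.getD_eq_getElem?_getD, List.getElem?_eq_getElem hlt]; rfl
    have estep : ((n : Int) + 1 - 1) = (n : Int) := by ring
    simp only [pvBFind, pvG, Nat.cast_add, Nat.cast_one, estep, Int.toNat_natCast, hget]
    have hb := pvBFind_bounds lines n
    set s := PySem.Str.strip lines[n] with hs
    set b := pvBFind lines ((n : Int) - 1) n with hbdef
    have hmax1 : max (b + 1) 0 = b + 1 := by omega
    have hmax2 : max ((n : Int) + 1) 0 = ((n : Int) + 1) := by omega
    have ih' : pvComp (PySem.List.slice lines (some (b + 1)) (some (n : Int))) =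
        pvG lines n := by
      have e1 : max (b + 1) 0 = b + 1 := by omega
      have e2 : max ((n : Int)) 0 = ((n : Int)) := by omega
      rw [← e1, ← e2]; exact ih (by omega)
    have hsplit : PySem.List.slice lines (some (b + 1)) (some ((n : Int) + 1)) =
        PySem.List.slice lines (some (b + 1)) (some (n : Int)) ++ [lines[n]] := by
      rw [PySem.List.slice_toNat _ (by omega) (by omega),
          PySem.List.slice_toNat _ (by omega) (by omega)]
      have ht : ((n : Int) + 1).toNat = n + 1 := by omega
      have ht' : ((n : Int)).toNat = n := by omega
      rw [ht, ht']
      have he : n + 1 - (b + 1).toNat = (n - (b + 1).toNat) + 1 := by omega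
      rw [he, List.take_add_one]
      congr 1
      have hidx : (b + 1).toNat + (n - (b + 1).toNat) = n := by omega
      have hg : (lines.drop (b + 1).toNat)[n - (b + 1).toNat]? = some lines[n] := by
        rw [List.getElem?_drop, hidx, List.getElem?_eq_getElem hlt]
      simp [hg]
    by_cases hsw : PySem.Str.startswith s "///" = true
    · -- doc line: kept by the filter, appended at the end of the window
      have hsw' : PySem.Chars.startswith s.toList ['/', '/', '/'] = true := by
        simpa [show "///".toList = ['/', '/', '/'] from rfl] using hsw
      rw [if_neg (by simp [hsw']), if_pos hsw, hmax1, hmax2, hsplit, pvComp_append, ih']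
      have hsingle : pvComp [lines[n]] =
          [PySem.Str.strip (PySem.Str.slice s (some 3) none)] := by
        simp only [pvComp, List.map_cons, List.map_nil, ← hs]
        rw [List.filter_cons_of_pos (by simpa using hsw)]
        simp
      rw [hsingle]
    · by_cases hemp : s = ""
      · -- blank line: dropped by the filter
        rw [if_neg (by simp [hemp]), if_neg hsw, if_pos hemp, hmax1, hmax2, hsplit,
            pvComp_append, ih']
        have hsingle : pvComp [lines[n]] = [] := by
          simp only [pvComp, List.map_cons, List.map_nil, ← hs]
          rw [List.filter_cons_of_neg (by simpa using hsw)]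
          simp
        rw [hsingle, List.append_nil]
      · -- real code: boundary is n, window empty
        rw [if_pos ⟨hemp, hsw⟩, if_neg hsw, if_neg hemp, hmax2]
        have hempty : PySem.List.slice lines (some ((n : Int) + 1))
            (some ((n : Int) + 1)) = [] := by
          rw [PySem.List.slice_toNat _ (by omega) (by omega)]
          simp
        rw [hempty]
        simp [pvComp]

-- ===== VERDICT (by name: the statement is the Claim_ definition above) =====
theorem collect_leading_doc_spec : Claim_equal_collect_leading_doc := by
  intro lines start_index _hdom hpre
  unfold Spec_collect_leading_doc collect_leading_doc collect_leading_doc_alt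
  rw [pvALoop_eq_g]
  simp only [List.reverse_nil, List.append_nil]
  have e1 : start_index - 1 = ((start_index.toNat : Nat) : Int) - 1 ∨ start_index ≤ 0 := by omega
  by_cases hpos : 0 < start_index
  · have hlen : start_index.toNat ≤ lines.length := by
      unfold Pre_collect_leading_doc at hpre; omega
    rw [show start_index - 1 = ((start_index.toNat : Nat) : Int) - 1 from by omega,
        show max start_index 0 = max ((start_index.toNat : Nat) : Int) 0 from by omega]
    exact (pvB_eq_g lines start_index.toNat hlen).symm
  · -- start_index ≤ 0: A collects nothing; B's window is empty
    have h0 : start_index.toNat = 0 := by omega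
    rw [h0]
    simp only [pvBFind]
    have hempty : PySem.List.slice lines (some (max (start_index - 1 + 1) 0))
        (some (max start_index 0)) = [] := by
      rw [PySem.List.slice_toNat _ (by omega) (by omega)]
      have : (max start_index 0).toNat = 0 := by omega
      simp [this]
    rw [hempty]
    simp [pvG, pvComp]
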